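-- pv_equiv track=rewrite | github.com/choudaryhussainali/200problems_Mastering_PYTHON_part-2 | PYTHON_Problems/problem_132.py | flatten_unique
-- ===== SOURCE A (Python) =====
-- def flatten_unique(lst):
--     seen = set()
--     result = []
--     for sub in lst:
--         for x in sub:
--             if x not in seen:
--                 seen.add(x)
--                 result.append(x)
--     return result
-- ===== SOURCE B (Python) =====
-- def flatten_unique(lst):
--     # Flatten first; then repeatedly emit the head and filter out all of its
--     # duplicates from the rest (selection-style uniquify, no 'seen' set).
--     flat = [x for sub in lst for x in sub]
--     out = []
--     while flat:
--         head = flat[0]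
--         out.append(head)
--         flat = [y for y in flat[1:] if y != head]
--     return out
-- ===== Notes on version B (the rewrite author's own statement) =====
-- stated objective: alternative
-- what changed: B flattens first and then uniquifies selection-style: repeatedly emit the head and filter every copy of it out of the remainder, with no seen-set and no membership branch.
import Mathlib
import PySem

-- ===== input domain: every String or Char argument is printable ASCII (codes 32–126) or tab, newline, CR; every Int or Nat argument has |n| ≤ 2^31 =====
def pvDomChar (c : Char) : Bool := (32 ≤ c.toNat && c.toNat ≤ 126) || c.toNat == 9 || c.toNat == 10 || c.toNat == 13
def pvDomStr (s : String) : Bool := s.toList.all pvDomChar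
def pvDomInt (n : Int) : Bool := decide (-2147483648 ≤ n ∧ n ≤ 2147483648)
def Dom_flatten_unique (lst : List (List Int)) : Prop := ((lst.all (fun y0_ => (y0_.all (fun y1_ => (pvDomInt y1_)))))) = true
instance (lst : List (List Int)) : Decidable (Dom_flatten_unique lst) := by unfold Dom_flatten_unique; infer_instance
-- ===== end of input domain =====

-- B flattens first, then uniquifies selection-style (emit head, filter its copies out of the rest) — no seen set; alternative algorithm, same result.


-- ===== PORT A =====
-- A: fused double loop with a 'seen' set and membership branch
def flatten_unique (lst : List (List Int)) : List Int :=
  (lst.foldl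
    (fun (st : PySem.Set Int × List Int) sub =>
      sub.foldl
        (fun st x =>
          if PySem.Set.contains st.1 x then st
          else (PySem.Set.add st.1 x, st.2 ++ [x])) st)
    (PySem.Set.empty, [])).2

-- ===== PORT B =====
-- B's while loop: emit the head, drop all its copies from the rest, repeat
def filtUniq (flat : List Int) : List Int :=
  match flat with
  | [] => []
  | h :: t => h :: filtUniq (t.filter (fun y => y ≠ h))
termination_by flat.length
decreasing_by
  have h1 : (t.attach.filter (fun x => decide ((x : {x // x ∈ t}).val ≠ h))).length ≤ t.length :=
    le_trans (List.length_filter_le _ _) (Nat.le_of_eq List.length_attach)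
  simpa [List.length_unattach] using Nat.lt_succ_of_le h1

def flatten_unique_alt (lst : List (List Int)) : List Int :=
  filtUniq (lst.flatMap (fun sub => sub))

-- ===== PRECONDITION & SPEC =====
def Spec_flatten_unique (lst : List (List Int)) (out : List Int) : Prop := out = flatten_unique_alt lst
instance (lst : List (List Int)) (out : List Int) : Decidable (Spec_flatten_unique lst out) := by unfold Spec_flatten_unique; infer_instance

-- ===== CLAIM (what is proved, stated in full; the proofs are below) =====
def Claim_equal_flatten_unique : Prop := ∀ (lst : List (List Int)), Dom_flatten_unique lst → Spec_flatten_unique lst (flatten_unique lst)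

-- ===== LEMMAS AND PROOFS =====

-- A's double loop is the fused loop over the flattened list
lemma outer_flat (lst : List (List Int)) (st : PySem.Set Int × List Int) :
    lst.foldl
      (fun (st : PySem.Set Int × List Int) sub =>
        sub.foldl
          (fun st x =>
            if PySem.Set.contains st.1 x then st
            else (PySem.Set.add st.1 x, st.2 ++ [x])) st) st
    = (lst.flatMap (fun sub => sub)).foldl
        (fun (st : PySem.Set Int × List Int) x =>
          if PySem.Set.contains st.1 x then st
          else (PySem.Set.add st.1 x, st.2 ++ [x])) st := by
  induction lst generalizing st with
  | nil => rfl
  | cons sub rest ih =>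
      simp only [List.foldl_cons, List.flatMap_cons, List.foldl_append]
      exact ih _

lemma filtUniq_cons (h : Int) (t : List Int) :
    filtUniq (h :: t) = h :: filtUniq (t.filter (fun y => decide (y ≠ h))) := by
  rw [filtUniq.eq_def]

-- A's fused loop = accumulator ++ filtUniq of the not-yet-seen elements
lemma fused_eq (xs : List Int) (s : PySem.Set Int) (r : List Int) :
    (xs.foldl
      (fun (st : PySem.Set Int × List Int) x =>
        if PySem.Set.contains st.1 x then st
        else (PySem.Set.add st.1 x, st.2 ++ [x])) (s, r)).2
    = r ++ filtUniq (xs.filter (fun x => ¬ PySem.Set.contains s x)) := by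
  induction xs generalizing s r with
  | nil => rw [filtUniq.eq_def]; simp
  | cons x t ih =>
      rw [List.foldl_cons, List.filter_cons]
      by_cases hx : PySem.Set.contains s x
      · have hd : (decide ¬(PySem.Set.contains s x = true)) = false := by simpa using hx
        rw [if_pos hx, hd]
        simpa using ih s r
      · have hd : (decide ¬(PySem.Set.contains s x = true)) = true := by simpa using hx
        rw [if_neg hx, hd, if_pos rfl]
        have hf : t.filter (fun y => decide ¬(PySem.Set.contains (PySem.Set.add s x) y = true))
            = (t.filter (fun y => decide ¬(PySem.Set.contains s y = true))).filter
                (fun y => decide (y ≠ x)) := by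
          rw [List.filter_filter]
          apply List.filter_congr
          intro y _
          have hx' : x ∉ s := by simpa using hx
          by_cases hy : y ∈ s <;> by_cases hyx : y = x <;>
            simp [PySem.Set.add, PySem.Set.contains, hx', hy, hyx]
        rw [filtUniq_cons, ih (PySem.Set.add s x) (r ++ [x]), hf, List.filter_filter]
        simp

-- ===== VERDICT (by name: the statement is the Claim_ definition above) =====
theorem flatten_unique_spec : Claim_equal_flatten_unique := by
  intro lst _
  unfold Spec_flatten_unique flatten_unique flatten_unique_alt
  rw [outer_flat, show (PySem.Set.empty : PySem.Set Int) = ([] : PySem.Set Int) from rfl,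
      fused_eq]
  have h : List.filter (fun x => decide ¬(PySem.Set.contains ([] : PySem.Set Int) x = true))
      (lst.flatMap (fun sub => sub)) = lst.flatMap (fun sub => sub) :=
    List.filter_eq_self.mpr (by intro a _; simp [PySem.Set.contains])
  rw [h]
  simp
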